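/- GENERATED by tools/from_farm_form.py from prooffarm-gif/accepted/DGifDecompressLine.4/Proof.lean (a worked proof of the farm's unit `DGifDecompressLine.4`,
   accepted by the verdict) — do not edit. -/
import Gif.Spec.Units.DGifDecompressLine_4
import Gif.Spec.AllSegs

open X86 X86.User Asan ProgX.Base ProgX.Base.Spec Gif.Spec

set_option maxRecDepth 4000
set_option maxHeartbeats 4000000

/-- Segment 4 of `DGifDecompressLine` (106FA0H … 106FEAH and 106C3FH … 106C63H; l.893-917): from `Decoded` (behind a successful
DGifDecompressInput, `CrntCode ≤ 4095` in the frame's object) through the dispatch on `CrntCode`: `== EOFCode`: the checked store of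
`GifFile->Error`, `eax = 0`, to the epilogue (`Done`); `== ClearCode`: the clear arm (`Mid` at 106CFBH, nothing stored);
`≥ ClearCode`: the trace arm (`Traced`, `r12d = CrntCode ≤ 4095`, nothing stored); else THE PIXEL `Line[i++] = CrntCode`, a checked
store inside `Line[0 … n)` by `i < LineLen` (`Upd` at 106FEAH: `i + 1 ≤ LineLen`, `StackPtr = 0` still, the measure untouched). -/
theorem Gif.Spec.Proved.DGifDecompressLine_4_ok : Gif.Spec.DGifDecompressLine_4.Statement := by
  intro Lay hLay μ hμ u₀ hcode h_store4 h_store1 H rest frames F R n m e ret v hat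
  obtain ⟨⟨⟨hbody, hloc, h_r14, h_r13, h_rbx, h_rbp, h_w1⟩, h_lt, h_sp0, h_mu⟩, h_code⟩ := hat
  -- 1. THE PRELUDE
  have he := hbody.entry
  v_entry he
  have hgin := hbody.gif_inside
  have hpin := hbody.pv_inside
  have hn31 : n < 2 ^ 31 := hbody.len_lt
  have w_rip := hbody.rip
  have c_rsp : v.reg .rsp = e.reg .rsp - 200 := hbody.rsp
  have w_eq : Mem.EqOn ProgX.Base.L.textLo ProgX.Base.L.textHi u₀.mem v.mem := ProgX.Base.conv_code_eqOn hbody.code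
  have hdf : v.flags .df = false := (show abiInv _ from hbody.abi).1
  have hmx : v.mxcsr &&& 0x1F80 = 0x1F80 := (show abiInv _ from hbody.abi).2
  have hsse := ProgX.Base.sseOK_of_abiInv hbody.abi
  have w_kept : RegsKept [.rsp] v v := RegsKept.refl _ _
  -- 2. THE REGISTERS AND SLOTS THE SEGMENT READS (0x106fa0, dgif_lib.c:893)
  -- `ebp = i < LineLen`: a non-negative `int` (`movsxd rbp, ebp` is the register itself)
  have hi31 : (v.reg .rbp).toNat < 2 ^ 31 := by omega
  -- `Line[0 … n)`, `1 ≤ n`: where it is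
  obtain ⟨hbuf, habove, hbelow, hap⟩ := hbody.line (by omega)
  -- `CrntCode`, the frame's object, as a number
  obtain ⟨c, k_code⟩ : ∃ c, v.mem.readLE (e.reg .rsp - 88) 4 = c := ⟨_, rfl⟩
  have hc : c ≤ 4095 := by
    rw [← k_code, rd_eq_readLE v.mem _ ((e.reg .rsp).toNat - 88) 4 (by u_omega)]
    exact h_code
  -- `ClearCode`, `EOFCode` as numbers
  have hcc256 := hbody.lz.clear
  have heof := hbody.lz.eof
  obtain ⟨cc, e_cc⟩ : ∃ cc, GifFilePrivateType.ClearCode v.mem F.pv = cc := ⟨_, rfl⟩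
  rw [e_cc] at hcc256 heof
  have k_clear : v.mem.readLE (e.reg .rsp - 184) 4 = cc := by
    rw [← e_cc]
    exact hloc.s_clear
  have k_eof : v.mem.readLE (e.reg .rsp - 156) 4 = cc + 1 := by
    rw [← heof]
    exact hloc.s_eof
  have k_line : v.mem.readLE (e.reg .rsp - 152) 8 = (e.reg .rsi).toNat := hbody.s_line
  have k_shadow : v.mem.readLE (e.reg .rsp - 128) 8 = ((e.reg .rsp - 120) >>> 3).toNat := hloc.s_shadow
  have k_gif : v.mem.readLE (e.reg .rsp - 168) 8 = F.gif := hbody.s_gif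
  -- 3. THE WALK: the three tests of l.893, l.900, l.913, up to the four exits
  u_walk hcode [hμ.vendor, Gif.Spec.sext32_small (v.reg .rbp) hi31]
    until [Gif.L.DGifDecompressLine.at_10709d, Gif.L.DGifDecompressLine.at_106cfb, Gif.L.DGifDecompressLine.at_106d06,
      Gif.L.DGifDecompressLine.at_106fea]
    span [ProgX.Base.L.textLo, ProgX.Base.L.textHi] side (v_side)
  -- 4. THE CHECK GOALS
  case check_106c4d =>
    -- l.898 `GifFile->Error = D_GIF_ERR_EOF_TOO_SOON`: inside gif
    have hun : ShadowUntouched v.mem s_106c4d.mem := by v_untouched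
    have hl : LiveIn (H.liveObjs ++ rest) (DGifDecompressLine.framesIn frames e) F.gif 120 :=
      hbody.ok.gif_live.liveIn rest _ (Nat.le_refl _) (Nat.le_refl _)
    exact hl.accSmall hbody.inv.shadow hun _ 4 (by decide) (by u_omega) (by u_omega)
  case check_106fde =>
    -- l.916 `Line[i++] = CrntCode`: inside `Line[0 … n)`, by `i < LineLen`
    have hun : ShadowUntouched v.mem s_106fde.mem := by v_untouched
    exact hbuf.live.accSmall hbody.inv.shadow hun _ 1 (by decide) (by u_omega) (by u_omega)
  -- 5. THE EXITS
  · -- 0x10709d (l.899, `return GIF_ERROR`): `Done`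
    have hun : ShadowUntouched v.mem s_106c5e.mem := by v_untouched
    have hsame : Mem.SameExcept [⟨(e.reg .rsp).toNat - 208, (e.reg .rsp).toNat - 200⟩, ⟨F.gif + 96, F.gif + 100⟩]
        v.mem s_106c5e.mem := by
      rw [w_mem]
      u_same
    have habi : (conv u₀).inv s_106c5e := by v_inv
    obtain ⟨k_body, k_loc, k_mu, k_cl, k_eo⟩ :=
      hbody.carry (cut' := Gif.L.DGifDecompressLine.at_10709d) w_rip w_rsp w_eq habi hun hsame (by dl_scratch)
    refine ReachVia.done (Or.inl ⟨k_body, w_r15, ?_⟩)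
    right
    rw [w_rax]
    decide
  · -- 0x106cfb (l.900, `CrntCode == ClearCode`): the clear arm, `Mid`
    have habi : (conv u₀).inv s_106fb9 := by v_inv
    refine ReachVia.done (Or.inr (Or.inl ⟨⟨hbody.moved w_rip w_rsp w_mem habi, hloc.moved w_mem, ?_, ?_, ?_, ?_, ?_⟩, ?_, ?_, ?_⟩))
    · rw [w_kept.get .r14 rfl]
      exact h_r14
    · rw [w_kept.get .r13 rfl]
      exact h_r13
    · rw [w_kept.get .rbx rfl]
      exact h_rbx
    · rw [w_kept.get .rbp rfl]
      exact h_rbp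
    · rw [w_kept.get .rbp rfl, w_kept.get .rbx rfl]
      exact h_w1
    · rw [w_kept.get .rbp rfl]
      exact h_lt
    · rw [w_kept.get .rbx rfl]
      exact h_sp0
    · rw [w_mem]
      exact h_mu
  · -- 0x106d06 (l.913, `CrntCode ≥ ClearCode`): the trace arm, `Traced`
    have habi : (conv u₀).inv s_106fc6 := by v_inv
    refine ReachVia.done (Or.inr (Or.inr (Or.inl
      ⟨⟨⟨hbody.moved w_rip w_rsp w_mem habi, hloc.moved w_mem, ?_, ?_, ?_, ?_, ?_⟩, ?_, ?_, ?_⟩, ?_⟩)))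
    · rw [w_kept.get .r14 rfl]
      exact h_r14
    · rw [w_kept.get .r13 rfl]
      exact h_r13
    · rw [w_kept.get .rbx rfl]
      exact h_rbx
    · rw [w_kept.get .rbp rfl]
      exact h_rbp
    · rw [w_kept.get .rbp rfl, w_kept.get .rbx rfl]
      exact h_w1
    · rw [w_kept.get .rbp rfl]
      exact h_lt
    · rw [w_kept.get .rbx rfl]
      exact h_sp0
    · rw [w_mem]
      exact h_mu
    · -- `r12d = CrntCode ≤ 4095`
      rw [w_r12, Gif.Spec.toNat_ofBV_ofNat32 c (by omega)]
      exact hc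
  · -- 0x106fea (l.974): behind the pixel arm, `Upd`
    have hun : ShadowUntouched v.mem s_106fe7.mem := by v_untouched
    have hsame : Mem.SameExcept [⟨(e.reg .rsp).toNat - 208, (e.reg .rsp).toNat - 200⟩,
        ⟨(e.reg .rsi).toNat + (v.reg .rbp).toNat, (e.reg .rsi).toNat + (v.reg .rbp).toNat + 1⟩] v.mem s_106fe7.mem := by
      rw [w_mem]
      u_same
    have habi : (conv u₀).inv s_106fe7 := by v_inv
    obtain ⟨k_body, k_loc, k_mu, k_cl, k_eo⟩ :=
      hbody.carry (cut' := Gif.L.DGifDecompressLine.at_106fea) w_rip w_rsp w_eq habi hun hsame (by dl_scratch)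
    have e_i : (s_106fe7.reg .rbp).toNat = (v.reg .rbp).toNat + 1 := by
      rw [w_rbp, Gif.Spec.lea32_succ _ (by omega)]
    refine ReachVia.done (Or.inr (Or.inr (Or.inr ⟨⟨k_body, k_loc hloc, ?_, ?_, ?_, ?_, ?_⟩, ?_⟩)))
    · rw [w_kept.get .r14 rfl]
      exact h_r14
    · rw [w_kept.get .r13 rfl]
      exact h_r13
    · rw [w_kept.get .rbx rfl]
      exact h_rbx
    · -- `i + 1 ≤ LineLen`
      rw [e_i]
      omega
    · -- W1: StackPtr = 0 still
      intro _
      rw [w_kept.get .rbx rfl]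
      exact h_sp0
    · -- the measure: no store of the segment touched it
      rw [k_mu]
      exact h_mu
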